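-- pv_equiv track=rewrite | github.com/raj1003daksh/camicroscope_code_challenge | gsoc.py | solve
-- ===== SOURCE A (Python) =====
-- from collections import deque
--
-- def solve(A):
--     q = deque()
--     r = len(A)
--     c = len(A[0])
--     map = {}
--     res = []
--
--     for i in range(r):
--         t = [-1]*c
--         res.append(t)
--
--     for i in range(r):
--         for j in range(c):
--             if A[i][j]==255:
--                 res[i][j]=0
--                 q.append((i,j))
--
--     while q:
--         src = q.popleft()
--         i , j = src[0],src[1]
--         if not (src in map):
--             map[src]=1
--             d = res[i][j]
--
--         if i>0 and res[i-1][j]==-1 :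
--             res[i-1][j] = d+1
--             q.append((i-1,j))
--
--         if i<r-1 and res[i+1][j]==-1 :
--             res[i+1][j] = d+1
--             q.append((i+1,j))
--
--         if j>0 and res[i][j-1]==-1 :
--             res[i][j-1] = d+1
--             q.append((i,j-1))
--
--         if j<c-1 and res[i][j+1]==-1 :
--             res[i][j+1] = d+1
--             q.append((i,j+1))
--
--     return res
-- ===== SOURCE B (Python) =====
-- def solve(A):
--     r = len(A)
--     c = len(A[0])
--     res = [[-1] * c for _ in range(r)]
--     frontier = []
--     for i in range(r):
--         for j in range(c):
--             if A[i][j] == 255: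
--                 res[i][j] = 0
--                 frontier.append((i, j))
--     dist = 1
--     while frontier:
--         nxt = []
--         for i, j in frontier:
--             for ni, nj in ((i - 1, j), (i + 1, j), (i, j - 1), (i, j + 1)):
--                 if 0 <= ni < r and 0 <= nj < c and res[ni][nj] == -1:
--                     res[ni][nj] = dist
--                     nxt.append((ni, nj))
--         frontier = nxt
--         dist += 1
--     return res
-- ===== Notes on version B (the rewrite author's own statement) =====
-- stated objective: alternative
-- what changed: Replaces the deque+visited-dict BFS that re-reads each cell's distance from the grid with a two-phase level-synchronous BFS: the whole frontier list is expanded into a next-frontier list while the distance is carried by the outer loop counter; no deque and no visited dict.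
import Mathlib
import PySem

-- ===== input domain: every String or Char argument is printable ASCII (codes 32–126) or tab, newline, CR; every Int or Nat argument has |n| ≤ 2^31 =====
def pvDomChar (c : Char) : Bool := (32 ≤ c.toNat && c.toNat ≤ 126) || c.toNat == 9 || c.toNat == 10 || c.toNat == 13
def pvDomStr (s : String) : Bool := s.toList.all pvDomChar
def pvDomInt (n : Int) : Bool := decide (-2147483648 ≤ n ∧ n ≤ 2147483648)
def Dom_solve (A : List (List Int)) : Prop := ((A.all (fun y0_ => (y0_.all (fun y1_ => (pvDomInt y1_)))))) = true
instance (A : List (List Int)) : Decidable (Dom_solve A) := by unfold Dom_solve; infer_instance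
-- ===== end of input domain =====

-- B replaces A's deque+visited-dict BFS by a level-synchronous two-phase BFS (the whole frontier
-- list is expanded into a next-frontier list, the distance is the outer loop counter); equal
-- return value proved below.  Both Pythons mutate only locally built lists; the return value is
-- what is compared.

-- ===== PORT A =====
-- shared 2-D grid helpers: exact for the non-negative in-bounds accesses both Pythons perform
-- (every grid access in either program is guarded to be in bounds on inputs in Pre_solve)
def getCell (g : List (List Int)) (i j : Int) : Int :=
  if 0 ≤ i ∧ 0 ≤ j then (g.getD i.toNat []).getD j.toNat 0 else 0

def setRow : List Int → Nat → Int → List Int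
  | [], _, _ => []
  | _ :: xs, 0, v => v :: xs
  | x :: xs, n+1, v => x :: setRow xs n v

def setGrid : List (List Int) → Nat → Nat → Int → List (List Int)
  | [], _, _, _ => []
  | row :: rows, 0, j, v => setRow row j v :: rows
  | row :: rows, n+1, j, v => row :: setGrid rows n j v

def setCell (g : List (List Int)) (i j : Int) (v : Int) : List (List Int) :=
  if 0 ≤ i ∧ 0 ≤ j then setGrid g i.toNat j.toNat v else g

-- the four 'if …: res[..] = d+1; q.append(..)' statements of A, one helper each
def tryUp (r c d i j : Int) (st : List (List Int) × List (Int × Int)) :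
    List (List Int) × List (Int × Int) :=
  if i > 0 ∧ getCell st.1 (i-1) j = -1 then (setCell st.1 (i-1) j (d+1), st.2 ++ [(i-1, j)]) else st

def tryDown (r c d i j : Int) (st : List (List Int) × List (Int × Int)) :
    List (List Int) × List (Int × Int) :=
  if i < r-1 ∧ getCell st.1 (i+1) j = -1 then (setCell st.1 (i+1) j (d+1), st.2 ++ [(i+1, j)]) else st

def tryLeft (r c d i j : Int) (st : List (List Int) × List (Int × Int)) :
    List (List Int) × List (Int × Int) :=
  if j > 0 ∧ getCell st.1 i (j-1) = -1 then (setCell st.1 i (j-1) (d+1), st.2 ++ [(i, j-1)]) else st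

def tryRight (r c d i j : Int) (st : List (List Int) × List (Int × Int)) :
    List (List Int) × List (Int × Int) :=
  if j < c-1 ∧ getCell st.1 i (j+1) = -1 then (setCell st.1 i (j+1) (d+1), st.2 ++ [(i, j+1)]) else st

-- the 'while q:' loop of A; fuel (r*c)+1 only makes the recursion structural, it is proved
-- sufficient below (each cell is enqueued at most once).  d0 carries Python's loop variable 'd'
-- (initial value 0 is never read: the first pop always takes the 'not in map' branch).
def solveLoop (r c : Int) : Nat → List (List Int) → List (Int × Int) → PySem.Dict (Int × Int) Int → Int → List (List Int)
  | 0, res, _, _, _ => res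
  | fuel+1, res, q, m, d0 =>
    match q with
    | [] => res
    | (i, j) :: q =>
      -- if not (src in map): map[src] = 1; d = res[i][j]
      let d := if m.contains (i, j) = false then getCell res i j else d0
      let m := if m.contains (i, j) = false then m.insert (i, j) 1 else m
      let st := tryRight r c d i j (tryLeft r c d i j (tryDown r c d i j (tryUp r c d i j (res, q))))
      solveLoop r c fuel st.1 st.2 m d

def solve (A : List (List Int)) : List (List Int) :=
  let r : Int := A.length
  let c : Int := A.headI.length   -- len(A[0]); Pre_solve excludes the empty A, where Python raises IndexError
  let res0 := (PySem.List.pyRange 0 r 1).foldl (fun res _ => res ++ [List.replicate c.toNat (-1)]) []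
  let st := (PySem.List.pyRange 0 r 1).foldl (fun st i =>
      (PySem.List.pyRange 0 c 1).foldl (fun st j =>
        if getCell A i j = 255 then (setCell st.1 i j 0, st.2 ++ [(i, j)]) else st) st)
    (res0, ([] : List (Int × Int)))
  solveLoop r c ((r * c).toNat + 1) st.1 st.2 (PySem.Dict.empty) 0

-- ===== PORT B =====
-- expand one frontier cell: try its four orthogonal neighbours in order
def expandCell (r c dist : Int) (st : List (List Int) × List (Int × Int)) (u : Int × Int) :
    List (List Int) × List (Int × Int) :=
  [(u.1 - 1, u.2), (u.1 + 1, u.2), (u.1, u.2 - 1), (u.1, u.2 + 1)].foldl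
    (fun st nb =>
      if 0 ≤ nb.1 ∧ nb.1 < r ∧ 0 ≤ nb.2 ∧ nb.2 < c ∧ getCell st.1 nb.1 nb.2 = -1 then
        (setCell st.1 nb.1 nb.2 dist, st.2 ++ [nb])
      else st) st

-- 'while frontier:' — one fuel unit per BFS level (again the fuel only makes the recursion structural)
def levelLoop (r c : Int) : Nat → List (List Int) → List (Int × Int) → Int → List (List Int)
  | 0, res, _, _ => res
  | fuel+1, res, frontier, dist =>
    if frontier = [] then res
    else
      let st := frontier.foldl (expandCell r c dist) (res, [])
      levelLoop r c fuel st.1 st.2 (dist + 1)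

def solve_alt (A : List (List Int)) : List (List Int) :=
  let r : Int := A.length
  let c : Int := A.headI.length
  let res0 := (PySem.List.pyRange 0 r 1).map (fun _ => List.replicate c.toNat (-1))
  let st := (PySem.List.pyRange 0 r 1).foldl (fun st i =>
      (PySem.List.pyRange 0 c 1).foldl (fun st j =>
        if getCell A i j = 255 then (setCell st.1 i j 0, st.2 ++ [(i, j)]) else st) st)
    (res0, ([] : List (Int × Int)))
  levelLoop r c ((r * c).toNat + 1) st.1 st.2 1

-- ===== PRECONDITION & SPEC =====
-- exactly the inputs on which Python's solve returns: A nonempty (else 'A[0]' raises IndexError)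
-- and every row at least as long as the first (else 'A[i][j]' raises IndexError for some j < c)
def Pre_solve (A : List (List Int)) : Prop := A ≠ [] ∧ ∀ row ∈ A, A.headI.length ≤ row.length
instance (A : List (List Int)) : Decidable (Pre_solve A) := by unfold Pre_solve; infer_instance

def pvWitness_solve : List (List Int) := [[255, 0], [0, 0]]

def Spec_solve (A : List (List Int)) (out : List (List Int)) : Prop := out = solve_alt A
instance (A : List (List Int)) (out : List (List Int)) : Decidable (Spec_solve A out) := by unfold Spec_solve; infer_instance

-- ===== CLAIM (what is proved, stated in full; the proofs are below) =====
def Claim_equal_solve : Prop := ∀ (A : List (List Int)), Dom_solve A → Pre_solve A → Spec_solve A (solve A)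

-- ===== LEMMAS AND PROOFS =====

def Inb (r c : Int) (u : Int × Int) : Prop := 0 ≤ u.1 ∧ u.1 < r ∧ 0 ≤ u.2 ∧ u.2 < c

def Shape (r c : Int) (g : List (List Int)) : Prop :=
  (g.length : Int) = r ∧ ∀ row ∈ g, (row.length : Int) = c

def negCnt (g : List (List Int)) : Nat := (g.map (fun row => row.count (-1))).sum

def upd (r c v : Int) (st : List (List Int) × List (Int × Int)) (u : Int × Int) :
    List (List Int) × List (Int × Int) :=
  if 0 ≤ u.1 ∧ u.1 < r ∧ 0 ≤ u.2 ∧ u.2 < c ∧ getCell st.1 u.1 u.2 = -1 then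
    (setCell st.1 u.1 u.2 v, st.2 ++ [u])
  else st


lemma length_setRow (l : List Int) (n : Nat) (v : Int) : (setRow l n v).length = l.length := by
  induction l generalizing n with
  | nil => rfl
  | cons x xs ih => cases n <;> simp [setRow, ih]

lemma getD_setRow_self (l : List Int) (n : Nat) (v : Int) (h : n < l.length) :
    (setRow l n v).getD n 0 = v := by
  induction l generalizing n with
  | nil => simp at h
  | cons x xs ih =>
    cases n with
    | zero => rfl
    | succ n => simpa [setRow] using ih n (by simpa using h)

lemma getD_setRow_ne (l : List Int) (m n : Nat) (v : Int) (h : m ≠ n) :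
    (setRow l n v).getD m 0 = l.getD m 0 := by
  induction l generalizing m n with
  | nil => simp [setRow]
  | cons x xs ih =>
    cases n with
    | zero => cases m with
      | zero => omega
      | succ m => simp [setRow]
    | succ n => cases m with
      | zero => simp [setRow]
      | succ m => simpa [setRow] using ih m n (by omega)

lemma count_setRow (l : List Int) (n : Nat) (v : Int) (hn : n < l.length)
    (hl : l.getD n 0 = -1) (hv : v ≠ -1) :
    (setRow l n v).count (-1) + 1 = l.count (-1) := by
  induction l generalizing n with
  | nil => simp at hn
  | cons x xs ih =>
    cases n with
    | zero =>
      have hx : x = -1 := by simpa using hl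
      subst hx
      simp [setRow, hv]
    | succ n =>
      have := ih n (by simpa using hn) (by simpa using hl)
      simp only [setRow, List.count_cons]
      omega

lemma length_setGrid (g : List (List Int)) (a b : Nat) (v : Int) :
    (setGrid g a b v).length = g.length := by
  induction g generalizing a with
  | nil => rfl
  | cons row rows ih => cases a <;> simp [setGrid, ih]

lemma rows_setGrid (g : List (List Int)) (a b : Nat) (v : Int) :
    ∀ row ∈ setGrid g a b v, ∃ row' ∈ g, row.length = row'.length := by
  induction g generalizing a with
  | nil => simp [setGrid]
  | cons row rows ih =>
    cases a with
    | zero =>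
      intro w hw
      rcases List.mem_cons.mp hw with hw | hw
      · exact ⟨row, by simp, by rw [hw]; exact length_setRow _ _ _⟩
      · exact ⟨w, by simp [hw], rfl⟩
    | succ a =>
      intro w hw
      rcases List.mem_cons.mp hw with hw | hw
      · exact ⟨row, by simp, by rw [hw]⟩
      · rcases ih a w hw with ⟨row', h1, h2⟩
        exact ⟨row', by simp [h1], h2⟩

lemma getD_setGrid_self (g : List (List Int)) (a b : Nat) (v : Int) :
    (setGrid g a b v).getD a [] = setRow (g.getD a []) b v := by
  induction g generalizing a with
  | nil => cases a <;> simp [setGrid, setRow]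
  | cons row rows ih =>
    cases a with
    | zero => simp [setGrid]
    | succ a => simp only [setGrid, List.getD_cons_succ]; exact ih a

lemma getD_setGrid_ne (g : List (List Int)) (m a b : Nat) (v : Int) (h : m ≠ a) :
    (setGrid g a b v).getD m [] = g.getD m [] := by
  induction g generalizing m a with
  | nil => simp [setGrid]
  | cons row rows ih =>
    cases a with
    | zero => cases m with
      | zero => omega
      | succ m => simp [setGrid]
    | succ a => cases m with
      | zero => simp [setGrid]
      | succ m => simpa [setGrid] using ih m a (by omega)

-- the facts packed into 'getCell g i j = -1' (out-of-range reads default to 0 ≠ -1)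
lemma getCell_neg_facts (g : List (List Int)) (i j : Int) (h : getCell g i j = -1) :
    0 ≤ i ∧ 0 ≤ j ∧ i.toNat < g.length ∧ j.toNat < (g.getD i.toNat []).length ∧
    (g.getD i.toNat []).getD j.toNat 0 = -1 := by
  unfold getCell at h
  split at h
  next hp =>
    obtain ⟨hi, hj⟩ := hp
    have hrow : i.toNat < g.length := by
      by_contra hcon
      rw [List.getD_eq_default g _ (by omega)] at h
      simp at h
    have hcol : j.toNat < (g.getD i.toNat []).length := by
      by_contra hcon
      rw [List.getD_eq_default (g.getD i.toNat []) _ (by omega)] at h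
      exact absurd h (by norm_num)
    exact ⟨hi, hj, hrow, hcol, h⟩
  next => exact absurd h (by norm_num)

lemma getCell_setCell_self (g : List (List Int)) (i j v : Int) (hg : getCell g i j = -1) :
    getCell (setCell g i j v) i j = v := by
  obtain ⟨hi, hj, hrow, hcol, hval⟩ := getCell_neg_facts g i j hg
  unfold setCell getCell
  rw [if_pos ⟨hi, hj⟩, if_pos ⟨hi, hj⟩, getD_setGrid_self, getD_setRow_self _ _ _ hcol]

lemma getCell_setCell_ne (g : List (List Int)) (i j i' j' v : Int)
    (h : ¬ (i = i' ∧ j = j')) : getCell (setCell g i j v) i' j' = getCell g i' j' := by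
  unfold setCell
  split
  next hp =>
    obtain ⟨hi, hj⟩ := hp
    unfold getCell
    split
    next hp' =>
      obtain ⟨hi', hj'⟩ := hp'
      by_cases hii : i.toNat = i'.toNat
      · have hieq : i = i' := by omega
        have hjne : j ≠ j' := fun hc => h ⟨hieq, hc⟩
        have hjj : j'.toNat ≠ j.toNat := by omega
        rw [← hieq, getD_setGrid_self, getD_setRow_ne _ _ _ _ hjj]
      · rw [getD_setGrid_ne _ _ _ _ _ (by omega)]
    next => rfl
  next => rfl

lemma negCnt_setGrid (g : List (List Int)) (a b : Nat) (v : Int)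
    (ha : a < g.length) (hb : b < (g.getD a []).length)
    (hval : (g.getD a []).getD b 0 = -1) (hv : v ≠ -1) :
    negCnt (setGrid g a b v) + 1 = negCnt g := by
  induction g generalizing a with
  | nil => simp at ha
  | cons row rows ih =>
    cases a with
    | zero =>
      have := count_setRow row b v (by simpa using hb) (by simpa using hval) hv
      simp only [setGrid, negCnt, List.map_cons, List.sum_cons]
      omega
    | succ a =>
      have := ih a (by simpa using ha) (by simpa using hb) (by simpa using hval)
      simp only [setGrid, negCnt, List.map_cons, List.sum_cons] at this ⊢
      omega

lemma negCnt_setCell (g : List (List Int)) (i j v : Int)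
    (hg : getCell g i j = -1) (hv : v ≠ -1) :
    negCnt (setCell g i j v) + 1 = negCnt g := by
  obtain ⟨hi, hj, hrow, hcol, hval⟩ := getCell_neg_facts g i j hg
  unfold setCell
  rw [if_pos ⟨hi, hj⟩]
  exact negCnt_setGrid g _ _ v hrow hcol hval hv

lemma Shape_setCell (r c : Int) (g : List (List Int)) (i j v : Int)
    (hs : Shape r c g) : Shape r c (setCell g i j v) := by
  obtain ⟨h1, h2⟩ := hs
  unfold setCell
  split
  · refine ⟨by rw [length_setGrid]; exact h1, ?_⟩
    intro row hrow
    rcases rows_setGrid g _ _ v row hrow with ⟨row', hmem, hlen⟩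
    rw [hlen]; exact h2 row' hmem
  · exact ⟨h1, h2⟩


lemma tryUp_eq (r c d i j : Int) (st : List (List Int) × List (Int × Int))
    (hi : 0 ≤ i) (hir : i < r) (hj : 0 ≤ j) (hjc : j < c) :
    tryUp r c d i j st = upd r c (d+1) st (i-1, j) := by
  simp only [tryUp, upd]
  split_ifs with hA hB hB
  · rfl
  · exact absurd ⟨by omega, by omega, hj, hjc, hA.2⟩ hB
  · exact absurd ⟨by omega, hB.2.2.2.2⟩ hA
  · rfl

lemma tryDown_eq (r c d i j : Int) (st : List (List Int) × List (Int × Int))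
    (hi : 0 ≤ i) (hir : i < r) (hj : 0 ≤ j) (hjc : j < c) :
    tryDown r c d i j st = upd r c (d+1) st (i+1, j) := by
  simp only [tryDown, upd]
  split_ifs with hA hB hB
  · rfl
  · exact absurd ⟨by omega, by omega, hj, hjc, hA.2⟩ hB
  · exact absurd ⟨by omega, hB.2.2.2.2⟩ hA
  · rfl

lemma tryLeft_eq (r c d i j : Int) (st : List (List Int) × List (Int × Int))
    (hi : 0 ≤ i) (hir : i < r) (hj : 0 ≤ j) (hjc : j < c) :
    tryLeft r c d i j st = upd r c (d+1) st (i, j-1) := by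
  simp only [tryLeft, upd]
  split_ifs with hA hB hB
  · rfl
  · exact absurd ⟨hi, hir, by omega, by omega, hA.2⟩ hB
  · exact absurd ⟨by omega, hB.2.2.2.2⟩ hA
  · rfl

lemma tryRight_eq (r c d i j : Int) (st : List (List Int) × List (Int × Int))
    (hi : 0 ≤ i) (hir : i < r) (hj : 0 ≤ j) (hjc : j < c) :
    tryRight r c d i j st = upd r c (d+1) st (i, j+1) := by
  simp only [tryRight, upd]
  split_ifs with hA hB hB
  · rfl
  · exact absurd ⟨hi, hir, by omega, by omega, hA.2⟩ hB
  · exact absurd ⟨by omega, hB.2.2.2.2⟩ hA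
  · rfl

lemma astep_eq (r c d i j : Int) (res : List (List Int)) (q : List (Int × Int))
    (hi : 0 ≤ i) (hir : i < r) (hj : 0 ≤ j) (hjc : j < c) :
    tryRight r c d i j (tryLeft r c d i j (tryDown r c d i j (tryUp r c d i j (res, q)))) =
    [(i-1, j), (i+1, j), (i, j-1), (i, j+1)].foldl (upd r c (d+1)) (res, q) := by
  simp only [List.foldl_cons, List.foldl_nil]
  rw [tryUp_eq r c d i j _ hi hir hj hjc, tryDown_eq r c d i j _ hi hir hj hjc,
      tryLeft_eq r c d i j _ hi hir hj hjc, tryRight_eq r c d i j _ hi hir hj hjc]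

lemma expandCell_eq (r c dist : Int) (st : List (List Int) × List (Int × Int)) (u : Int × Int) :
    expandCell r c dist st u =
    [(u.1 - 1, u.2), (u.1 + 1, u.2), (u.1, u.2 - 1), (u.1, u.2 + 1)].foldl (upd r c dist) st := rfl

lemma solveLoop_nil (r c : Int) (fa : Nat) (res : List (List Int))
    (m : PySem.Dict (Int × Int) Int) (d0 : Int) : solveLoop r c fa res [] m d0 = res := by
  cases fa <;> rfl

lemma levelLoop_nil (r c : Int) (fb : Nat) (res : List (List Int)) (dist : Int) :
    levelLoop r c fb res [] dist = res := by
  cases fb <;> simp [levelLoop]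

lemma fold_upd_spec (r c v : Int) (hv : v ≠ -1) :
    ∀ (cs : List (Int × Int)) (res : List (List Int)), Shape r c res →
    ∃ res' S, Shape r c res' ∧ S.Nodup ∧ negCnt res' + S.length = negCnt res ∧
      (∀ u ∈ S, Inb r c u ∧ getCell res u.1 u.2 = -1) ∧
      (∀ u : Int × Int, getCell res' u.1 u.2 = if u ∈ S then v else getCell res u.1 u.2) ∧
      (∀ q0 : List (Int × Int), cs.foldl (upd r c v) (res, q0) = (res', q0 ++ S)) := by
  intro cs
  induction cs with
  | nil =>
    intro res hs
    exact ⟨res, [], hs, by simp, by simp, by simp, by simp, by simp⟩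
  | cons u cs ih =>
    intro res hs
    by_cases hc : 0 ≤ u.1 ∧ u.1 < r ∧ u.2 ≥ 0 ∧ u.2 < c ∧ getCell res u.1 u.2 = -1
    case pos =>
      have hc' : 0 ≤ u.1 ∧ u.1 < r ∧ 0 ≤ u.2 ∧ u.2 < c ∧ getCell res u.1 u.2 = -1 := hc
      set res1 := setCell res u.1 u.2 v with hres1
      have hs1 : Shape r c res1 := Shape_setCell r c res u.1 u.2 v hs
      obtain ⟨res', S, Hs, Hnd, Hcnt, Hmem, Hval, Hfold⟩ := ih res1 hs1
      have hgu : getCell res1 u.1 u.2 = v := getCell_setCell_self res u.1 u.2 v hc'.2.2.2.2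
      have huS : u ∉ S := by
        intro hin
        have := (Hmem u hin).2
        rw [hgu] at this
        exact hv this
      refine ⟨res', u :: S, Hs, List.nodup_cons.mpr ⟨huS, Hnd⟩, ?_, ?_, ?_, ?_⟩
      · have h1 := negCnt_setCell res u.1 u.2 v hc'.2.2.2.2 hv
        rw [← hres1] at h1
        simp only [List.length_cons]
        omega
      · intro w hw
        rcases List.mem_cons.mp hw with hw | hw
        · subst hw
          exact ⟨⟨hc'.1, hc'.2.1, hc'.2.2.1, hc'.2.2.2.1⟩, hc'.2.2.2.2⟩
        · obtain ⟨hib, hg⟩ := Hmem w hw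
          refine ⟨hib, ?_⟩
          have hwu : w ≠ u := by
            intro hww
            rw [hww, hgu] at hg
            exact hv hg
          have hne2 : ¬ (u.1 = w.1 ∧ u.2 = w.2) := by
            rintro ⟨h1, h2⟩
            exact hwu (by cases u; cases w; simp_all)
          rw [← getCell_setCell_ne res u.1 u.2 w.1 w.2 v hne2]
          exact hg
      · intro w
        by_cases hwu : w = u
        · subst hwu
          rw [Hval w, if_neg huS, hgu, if_pos (List.mem_cons_self)]
        · have hne2 : ¬ (u.1 = w.1 ∧ u.2 = w.2) := by
            rintro ⟨h1, h2⟩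
            exact hwu (by cases u; cases w; simp_all)
          rw [Hval w]
          have hstep : getCell res1 w.1 w.2 = getCell res w.1 w.2 :=
            getCell_setCell_ne res u.1 u.2 w.1 w.2 v hne2
          by_cases hwS : w ∈ S
          · rw [if_pos hwS, if_pos (List.mem_cons_of_mem _ hwS)]
          · rw [if_neg hwS, if_neg (by simp [hwu, hwS]), hstep]
      · intro q0
        have hstep1 : (u :: cs).foldl (upd r c v) (res, q0) = cs.foldl (upd r c v) (res1, q0 ++ [u]) := by
          simp only [List.foldl_cons, upd]
          rw [if_pos hc']
        rw [hstep1, Hfold (q0 ++ [u]), List.append_assoc]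
        simp
    case neg =>
      obtain ⟨res', S, Hs, Hnd, Hcnt, Hmem, Hval, Hfold⟩ := ih res hs
      refine ⟨res', S, Hs, Hnd, Hcnt, Hmem, Hval, ?_⟩
      intro q0
      simp only [List.foldl_cons, upd]
      rw [if_neg hc]
      exact Hfold q0


-- FIFO BFS (A) = level-synchronous BFS (B): the queue is always (rest of current level) ++
-- (prefix of next level); popping the whole current level performs exactly one level expansion.
lemma mainLoop (r c : Int) :
    ∀ (fb : Nat) (F1 F2 : List (Int × Int)) (fa : Nat) (res : List (List Int))
      (m : PySem.Dict (Int × Int) Int) (d0 dist : Int),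
    Shape r c res → 1 ≤ dist →
    (∀ u ∈ F1, Inb r c u ∧ getCell res u.1 u.2 = dist - 1) →
    (∀ u ∈ F2, Inb r c u ∧ getCell res u.1 u.2 = dist) →
    (F1 ++ F2).Nodup →
    (∀ u ∈ F1 ++ F2, m.contains u = false) →
    (∀ k : Int × Int, m.contains k = true → getCell res k.1 k.2 ≠ -1) →
    F1.length + F2.length + negCnt res ≤ fa →
    negCnt res + (if F2 = [] then 1 else 2) ≤ fb →
    solveLoop r c fa res (F1 ++ F2) m d0 =
      levelLoop r c fb (F1.foldl (expandCell r c dist) (res, F2)).1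
        (F1.foldl (expandCell r c dist) (res, F2)).2 (dist + 1) := by
  intro fb
  induction fb with
  | zero =>
    intro F1 F2 fa res m d0 dist _ _ _ _ _ _ _ _ hfb
    split_ifs at hfb <;> omega
  | succ fb ihb =>
    intro F1 F2
    induction F1 generalizing F2 with
    | nil =>
      intro fa res m d0 dist hsh hdist hF1 hF2 hnd hm hmok hfa hfb
      by_cases h2 : F2 = []
      · subst h2
        simp only [List.nil_append, List.foldl_nil]
        rw [solveLoop_nil, levelLoop_nil]
      · simp only [List.nil_append, List.foldl_nil]
        have hlev : levelLoop r c (fb+1) res F2 (dist+1) =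
            levelLoop r c fb (F2.foldl (expandCell r c (dist+1)) (res, [])).1
              (F2.foldl (expandCell r c (dist+1)) (res, [])).2 (dist+1+1) := by
          simp only [levelLoop]
          rw [if_neg h2]
        rw [hlev]
        have := ihb F2 [] fa res m d0 (dist+1) hsh (by omega)
          (by intro u hu; obtain ⟨h1, h2'⟩ := hF2 u hu; exact ⟨h1, by omega⟩)
          (by intro u hu; simp at hu)
          (by simpa using hnd)
          (by intro u hu; rw [List.append_nil] at hu; exact hm u (by simpa using hu))
          hmok
          (by simp only [List.length_nil] at hfa ⊢; omega)
          (by rw [if_pos rfl]; rw [if_neg h2] at hfb; omega)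
        rw [List.append_nil] at this
        exact this
    | cons u F1' ih =>
      intro fa res m d0 dist hsh hdist hF1 hF2 hnd hm hmok hfa hfb
      obtain ⟨i, j⟩ := u
      have hu := hF1 (i, j) (by simp)
      obtain ⟨⟨hi0, hir, hj0, hjc⟩, hget⟩ := hu
      cases fa with
      | zero => simp only [List.length_cons] at hfa; omega
      | succ fa =>
        have hmc : m.contains (i, j) = false := hm (i, j) (by simp)
        simp only [List.cons_append, solveLoop]
        simp only [hmc, if_true]
        rw [hget]
        rw [astep_eq r c (dist-1) i j res (F1' ++ F2) hi0 hir hj0 hjc]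
        have hdv : dist - 1 + 1 = dist := by ring
        rw [hdv]
        obtain ⟨res', S, Hs, Hnd, Hcnt, Hmem, Hval, Hfold⟩ :=
          fold_upd_spec r c dist (by omega) [(i-1, j), (i+1, j), (i, j-1), (i, j+1)] res hsh
        rw [Hfold (F1' ++ F2)]
        have hexp : expandCell r c dist (res, F2) (i, j) = (res', F2 ++ S) := by
          rw [expandCell_eq]
          exact Hfold F2
        rw [List.foldl_cons, hexp, List.append_assoc]
        -- facts about S members vs queue members
        have hSres : ∀ w ∈ S, getCell res w.1 w.2 = -1 := fun w hw => (Hmem w hw).2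
        have hndc : ((i, j) :: (F1' ++ F2)).Nodup := by simpa using hnd
        obtain ⟨hnotin, hnd1⟩ := List.nodup_cons.mp hndc
        have hqval : ∀ w ∈ F1' ++ F2, getCell res w.1 w.2 = dist - 1 ∨ getCell res w.1 w.2 = dist := by
          intro w hw
          rcases List.mem_append.mp hw with hw | hw
          · exact Or.inl (hF1 w (List.mem_cons_of_mem _ hw)).2
          · exact Or.inr (hF2 w hw).2
        have hqS : ∀ w ∈ F1' ++ F2, w ∉ S := by
          intro w hw hwS
          rcases hqval w hw with h | h <;> (have := hSres w hwS; omega)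
        have hijS : (i, j) ∉ S := by
          intro hin
          have := hSres (i, j) hin
          omega
        apply ih (F2 ++ S) fa res' (m.insert (i, j) 1) (dist - 1) dist Hs hdist
        · intro w hw
          obtain ⟨hib, hg⟩ := hF1 w (List.mem_cons_of_mem _ hw)
          have hwS : w ∉ S := hqS w (List.mem_append_left _ hw)
          refine ⟨hib, ?_⟩
          rw [Hval w, if_neg hwS]
          exact hg
        · intro w hw
          rcases List.mem_append.mp hw with hw | hw
          · obtain ⟨hib, hg⟩ := hF2 w hw
            have hwS : w ∉ S := hqS w (List.mem_append_right _ hw)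
            refine ⟨hib, ?_⟩
            rw [Hval w, if_neg hwS]
            exact hg
          · obtain ⟨hib, _⟩ := Hmem w hw
            refine ⟨hib, ?_⟩
            rw [Hval w, if_pos hw]
        · rw [← List.append_assoc]
          exact List.nodup_append.mpr ⟨hnd1, Hnd, by intro a ha b hb hab; exact hqS a ha (hab ▸ hb)⟩
        · intro w hw
          rw [← List.append_assoc] at hw
          rcases List.mem_append.mp hw with hw | hw
          · have hwne : w ≠ (i, j) := fun hww => hnotin (hww ▸ hw)
            have := hm w (List.mem_cons_of_mem _ hw)
            rw [PySem.Dict.contains_insert]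
            simp [hwne, this]
          · have hwne : w ≠ (i, j) := by
              intro hww
              have := hSres w hw
              rw [hww] at this
              omega
            have hwc : m.contains w = false := by
              cases hb : m.contains w
              · rfl
              · exact absurd (hSres w hw) (hmok w hb)
            rw [PySem.Dict.contains_insert]
            simp [hwne, hwc]
        · intro k hk
          rw [PySem.Dict.contains_insert] at hk
          rcases Bool.or_eq_true_iff.mp hk with hk | hk
          · have hkij : k = (i, j) := by simpa using hk
            subst hkij
            rw [Hval (i, j), if_neg hijS]
            omega
          · have hres := hmok k hk
            rw [Hval k]
            split_ifs with hkS
            · omega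
            · exact hres
        · simp only [List.length_append, List.length_cons] at hfa ⊢
          omega
        · by_cases hS : S = []
          · subst hS
            simp only [List.length_nil] at Hcnt
            simp only [List.append_nil]
            split_ifs at hfb ⊢ <;> omega
          · have hne : F2 ++ S ≠ [] := by simp [hS]
            have hlen : 0 < S.length := List.length_pos_iff.mpr hS
            rw [if_neg hne]
            split_ifs at hfb <;> omega


lemma foldl_append_rows (l : List Int) (row : List Int) :
    ∀ (init : List (List Int)),
    l.foldl (fun res _ => res ++ [row]) init = init ++ List.replicate l.length row := by
  induction l with
  | nil => intro init; simp
  | cons x l ih =>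
    intro init
    simp only [List.foldl_cons, List.length_cons, List.replicate_succ]
    rw [ih]
    simp

lemma map_const_replicate (l : List Int) (row : List Int) :
    l.map (fun _ => row) = List.replicate l.length row := by
  induction l with
  | nil => rfl
  | cons x l ih => simp [ih, List.replicate_succ]

lemma mark_nested (A : List (List Int)) (l2 : List Int) :
    ∀ (l1 : List Int) (st0 : List (List Int) × List (Int × Int)),
    l1.foldl (fun st i => l2.foldl (fun st j =>
        if getCell A i j = 255 then (setCell st.1 i j 0, st.2 ++ [(i, j)]) else st) st) st0 =
    (l1.flatMap (fun i => l2.map (fun j => (i, j)))).foldl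
      (fun st p => if getCell A p.1 p.2 = 255 then (setCell st.1 p.1 p.2 0, st.2 ++ [p]) else st) st0 := by
  intro l1
  induction l1 with
  | nil => intro st0; rfl
  | cons i l1 ih =>
    intro st0
    simp only [List.foldl_cons, List.flatMap_cons, List.foldl_append]
    rw [ih]
    congr 1
    rw [List.foldl_map]

lemma nodup_pairs (l1 l2 : List Int) (h1 : l1.Nodup) (h2 : l2.Nodup) :
    (l1.flatMap (fun i => l2.map (fun j => (i, j)))).Nodup := by
  induction l1 with
  | nil => simp
  | cons i l1 ih =>
    obtain ⟨hni, h1'⟩ := List.nodup_cons.mp h1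
    simp only [List.flatMap_cons]
    refine List.nodup_append.mpr ⟨h2.map (fun a b h => by simpa using h), ih h1', ?_⟩
    intro a ha b hb hab
    rcases List.mem_map.mp ha with ⟨j, _, rfl⟩
    subst hab
    rcases List.mem_flatMap.mp hb with ⟨i', hi', hmem⟩
    rcases List.mem_map.mp hmem with ⟨j', _, hpq⟩
    have : i' = i := (Prod.mk.injEq _ _ _ _ |>.mp hpq).1.symm ▸ rfl
    exact hni (by rw [← (Prod.mk.injEq _ _ _ _ |>.mp hpq).1]; exact hi')

lemma mem_pairs (r c : Int) (p : Int × Int) :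
    p ∈ (PySem.List.pyRange 0 r 1).flatMap (fun i => (PySem.List.pyRange 0 c 1).map (fun j => (i, j))) ↔
    Inb r c p := by
  simp only [List.mem_flatMap, List.mem_map, PySem.List.mem_pyRange_one, Inb]
  constructor
  · rintro ⟨i, ⟨hi0, hi1⟩, j, ⟨hj0, hj1⟩, rfl⟩
    exact ⟨hi0, hi1, hj0, hj1⟩
  · rintro ⟨h1, h2, h3, h4⟩
    exact ⟨p.1, ⟨h1, h2⟩, p.2, ⟨h3, h4⟩, rfl⟩

lemma getCell_replicate (rn cn : Nat) (i j : Int)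
    (hi : 0 ≤ i) (hir : i < rn) (hj : 0 ≤ j) (hjc : j < cn) :
    getCell (List.replicate rn (List.replicate cn (-1))) i j = -1 := by
  have h1 : i.toNat < rn := by omega
  have h2 : j.toNat < cn := by omega
  simp [getCell, hi, hj, List.getD_eq_getElem?_getD, h1, h2]

lemma Shape_replicate (r c : Int) (h0r : 0 ≤ r) (h0c : 0 ≤ c) :
    Shape r c (List.replicate r.toNat (List.replicate c.toNat (-1))) := by
  constructor
  · simp [List.length_replicate]; omega
  · intro row hrow
    rw [List.eq_of_mem_replicate hrow]
    simp [List.length_replicate]; omega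

lemma negCnt_replicate (rn cn : Nat) :
    negCnt (List.replicate rn (List.replicate cn (-1))) = rn * cn := by
  simp [negCnt, List.map_replicate, List.count_replicate_self, List.sum_replicate, smul_eq_mul]

lemma init_mark (A : List (List Int)) (r c : Int) (M : Nat) :
    ∀ (ps : List (Int × Int)) (res : List (List Int)) (q : List (Int × Int)),
    Shape r c res → ps.Nodup →
    (∀ p ∈ ps, Inb r c p ∧ getCell res p.1 p.2 = -1) →
    (∀ u ∈ q, (Inb r c u ∧ getCell res u.1 u.2 = 0) ∧ u ∉ ps) →
    q.Nodup → q.length + negCnt res ≤ M →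
    Shape r c (ps.foldl (fun st p => if getCell A p.1 p.2 = 255 then (setCell st.1 p.1 p.2 0, st.2 ++ [p]) else st) (res, q)).1 ∧
    (∀ u ∈ (ps.foldl (fun st p => if getCell A p.1 p.2 = 255 then (setCell st.1 p.1 p.2 0, st.2 ++ [p]) else st) (res, q)).2,
      Inb r c u ∧ getCell (ps.foldl (fun st p => if getCell A p.1 p.2 = 255 then (setCell st.1 p.1 p.2 0, st.2 ++ [p]) else st) (res, q)).1 u.1 u.2 = 0) ∧
    (ps.foldl (fun st p => if getCell A p.1 p.2 = 255 then (setCell st.1 p.1 p.2 0, st.2 ++ [p]) else st) (res, q)).2.Nodup ∧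
    (ps.foldl (fun st p => if getCell A p.1 p.2 = 255 then (setCell st.1 p.1 p.2 0, st.2 ++ [p]) else st) (res, q)).2.length +
      negCnt (ps.foldl (fun st p => if getCell A p.1 p.2 = 255 then (setCell st.1 p.1 p.2 0, st.2 ++ [p]) else st) (res, q)).1 ≤ M := by
  intro ps
  induction ps with
  | nil =>
    intro res q hsh _ _ hq hndq hM
    exact ⟨hsh, fun u hu => (hq u hu).1, hndq, hM⟩
  | cons p ps ih =>
    intro res q hsh hnd hps hq hndq hM
    obtain ⟨hpin, hnd'⟩ := List.nodup_cons.mp hnd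
    obtain ⟨hinb, hneg⟩ := hps p List.mem_cons_self
    simp only [List.foldl_cons]
    by_cases h255 : getCell A p.1 p.2 = 255
    · rw [if_pos h255]
      have hres1 := negCnt_setCell res p.1 p.2 0 hneg (by norm_num)
      apply ih
      · exact Shape_setCell r c res p.1 p.2 0 hsh
      · exact hnd'
      · intro p' hp'
        obtain ⟨hinb', hneg'⟩ := hps p' (List.mem_cons_of_mem _ hp')
        refine ⟨hinb', ?_⟩
        have hne : ¬ (p.1 = p'.1 ∧ p.2 = p'.2) := by
          rintro ⟨e1, e2⟩
          exact hpin (by rw [show p = p' from by cases p; cases p'; simp_all]; exact hp')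
        rw [getCell_setCell_ne res p.1 p.2 p'.1 p'.2 0 hne]
        exact hneg'
      · intro u hu
        rcases List.mem_append.mp hu with hu | hu
        · obtain ⟨⟨hinbu, hgu⟩, hups⟩ := hq u hu
          have hne : ¬ (p.1 = u.1 ∧ p.2 = u.2) := by
            rintro ⟨e1, e2⟩
            exact hups (by rw [show u = p from by cases p; cases u; simp_all]; exact List.mem_cons_self)
          refine ⟨⟨hinbu, ?_⟩, fun hc => hups (List.mem_cons_of_mem _ hc)⟩
          rw [getCell_setCell_ne res p.1 p.2 u.1 u.2 0 hne]
          exact hgu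
        · have hup : u = p := by simpa using hu
          subst hup
          exact ⟨⟨hinb, getCell_setCell_self res u.1 u.2 0 hneg⟩, hpin⟩
      · refine List.nodup_append.mpr ⟨hndq, List.nodup_singleton _, ?_⟩
        intro a ha b hb hab
        have hbp : b = p := by simpa using hb
        subst hbp
        subst hab
        exact (hq a ha).2 List.mem_cons_self
      · simp only [List.length_append, List.length_singleton]
        omega
    · rw [if_neg h255]
      apply ih
      · exact hsh
      · exact hnd'
      · exact fun p' hp' => hps p' (List.mem_cons_of_mem _ hp')
      · exact fun u hu => ⟨(hq u hu).1, fun hc => (hq u hu).2 (List.mem_cons_of_mem _ hc)⟩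
      · exact hndq
      · exact hM

-- ===== VERDICT (by name: the statement is the Claim_ definition above) =====
theorem solve_spec : Claim_equal_solve := by
  unfold Claim_equal_solve Spec_solve
  intro A _ _
  simp only [solve, solve_alt]
  rw [foldl_append_rows, map_const_replicate, PySem.List.length_pyRange_one, List.nil_append,
      sub_zero, mark_nested]
  have h0r : (0 : Int) ≤ (A.length : Int) := by positivity
  have h0c : (0 : Int) ≤ (A.headI.length : Int) := by positivity
  set r : Int := (A.length : Int) with hrdef
  set c : Int := (A.headI.length : Int) with hcdef
  set res0 : List (List Int) := List.replicate r.toNat (List.replicate c.toNat (-1)) with hres0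
  set pairs : List (Int × Int) :=
    (PySem.List.pyRange 0 r 1).flatMap (fun i => (PySem.List.pyRange 0 c 1).map (fun j => (i, j))) with hpairs
  set st := pairs.foldl
    (fun st p => if getCell A p.1 p.2 = 255 then (setCell st.1 p.1 p.2 0, st.2 ++ [p]) else st)
    (res0, ([] : List (Int × Int))) with hst
  have hN : (r * c).toNat = r.toNat * c.toNat := by
    have h1 : r * c = ((r.toNat * c.toNat : Nat) : Int) := by
      push_cast
      rw [Int.toNat_of_nonneg h0r, Int.toNat_of_nonneg h0c]
    rw [h1, Int.toNat_natCast]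
  obtain ⟨Hsh, Hq, Hnd, Hcnt⟩ := init_mark A r c (r.toNat * c.toNat) pairs res0 []
    (Shape_replicate r c h0r h0c)
    (nodup_pairs _ _ (PySem.List.nodup_pyRange_one _ _) (PySem.List.nodup_pyRange_one _ _))
    (by
      intro p hp
      have hinb : Inb r c p := (mem_pairs r c p).mp hp
      exact ⟨hinb, getCell_replicate r.toNat c.toNat p.1 p.2 hinb.1 (by have := hinb.2.1; omega)
        hinb.2.2.1 (by have := hinb.2.2.2; omega)⟩)
    (by intro u hu; simp at hu)
    (by simp)
    (by rw [hres0, negCnt_replicate]; simp)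
  rw [← hst] at Hsh Hq Hnd Hcnt
  by_cases hqe : st.2 = []
  · rw [hqe, solveLoop_nil, levelLoop_nil]
  · have hlev : levelLoop r c ((r * c).toNat + 1) st.1 st.2 1 =
        levelLoop r c ((r * c).toNat) (st.2.foldl (expandCell r c 1) (st.1, [])).1
          (st.2.foldl (expandCell r c 1) (st.1, [])).2 (1 + 1) := by
      simp only [levelLoop]
      rw [if_neg hqe]
    rw [hlev]
    have hlenq : 0 < st.2.length := List.length_pos_iff.mpr hqe
    have := mainLoop r c ((r * c).toNat) st.2 [] ((r * c).toNat + 1) st.1 PySem.Dict.empty 0 1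
      Hsh (le_refl 1)
      (by intro u hu; obtain ⟨h1, h2⟩ := Hq u hu; exact ⟨h1, by omega⟩)
      (by intro u hu; simp at hu)
      (by simpa using Hnd)
      (by intro u _; exact PySem.Dict.contains_empty _)
      (by intro k hk; rw [PySem.Dict.contains_empty] at hk; exact absurd hk (by simp))
      (by simp only [List.length_nil]; omega)
      (by rw [if_pos rfl]; omega)
    rw [List.append_nil] at this
    exact this
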